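-- pv_equiv track=rewrite | github.com/shaswatsingh19/My-Learnings | CP website/Codechef/contest/May Challenge 2020 division 2/Isolation_Centers.py | query
-- ===== SOURCE A (Python) =====
-- def query(c,s):
--     d = {}
--     for i in s:
--         if i not in d:
--             d[i] = 1
--         elif d[i] != c:
--             d[i] = d[i] + 1
--     add = sum(d.values())
--     return add
-- ===== SOURCE B (Python) =====
-- def query(c, s):
--     # Sort the characters so equal ones are adjacent, then scan once,
--     # tracking the length of the current run; an occurrence counts only
--     # while its run position is within the capacity c.
--     total = 0
--     run = 0
--     prev = None
--     for ch in sorted(s):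
--         run = run + 1 if ch == prev else 1
--         prev = ch
--         if run <= c:
--             total += 1
--     return total
-- ===== Notes on version B (the rewrite author's own statement) =====
-- stated objective: alternative
-- what changed: Replaces A's dict of per-character counts built with an increment-until-cap sentinel by sort-then-scan: sort the characters so equal ones are adjacent and count, in one linear scan with a run-length counter, the occurrences whose position within their run is at most c.
-- intended difference: For c < 1 and nonempty s, A's d[i]==c cap test can never fire (counts start at 1), so A returns len(s); B returns 0, the intended result since a nonpositive capacity c admits no occurrences. — e.g. on query(0, "a"): A returns 1, B returns 0
import Mathlib
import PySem

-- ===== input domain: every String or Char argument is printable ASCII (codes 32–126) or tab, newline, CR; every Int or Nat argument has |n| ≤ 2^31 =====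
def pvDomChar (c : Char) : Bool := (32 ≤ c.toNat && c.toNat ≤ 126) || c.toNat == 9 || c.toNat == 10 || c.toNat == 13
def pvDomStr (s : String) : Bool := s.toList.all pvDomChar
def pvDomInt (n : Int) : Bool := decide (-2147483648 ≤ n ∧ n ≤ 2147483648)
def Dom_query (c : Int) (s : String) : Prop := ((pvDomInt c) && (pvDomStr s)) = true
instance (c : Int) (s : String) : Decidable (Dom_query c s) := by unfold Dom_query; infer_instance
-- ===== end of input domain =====

-- B replaces A's per-character count dict (increment until the d[i]==c sentinel) by sort-then-scan with a
-- run-length counter: a genuinely different traversal, equal return value outside the stated D_ corner.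

-- ===== PORT A =====
-- one loop iteration of A: if i not in d: d[i] = 1  elif d[i] != c: d[i] = d[i] + 1
def queryStep (c : Int) (d : PySem.Dict Char Int) (i : Char) : PySem.Dict Char Int :=
  if ¬ d.contains i then d.insert i 1
  else if d.getD i 0 ≠ c then d.insert i (d.getD i 0 + 1)
  else d

def query (c : Int) (s : String) : Int :=
  ((s.toList.foldl (queryStep c) PySem.Dict.empty).values).sum

-- ===== PORT B =====
-- Source B's loop body: run = run + 1 if ch == prev else 1; prev = ch; if run <= c: total += 1
-- state = (total, run, prev)
def bStep (c : Int) (st : Int × Int × Option Char) (ch : Char) : Int × Int × Option Char :=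
  let run : Int := if st.2.2 == some ch then st.2.1 + 1 else 1
  (st.1 + (if run ≤ c then 1 else 0), run, some ch)

def query_alt (c : Int) (s : String) : Int :=
  ((PySem.List.sorted s.toList (fun x => x) false).foldl (bStep c) (0, 0, none)).1

-- ===== PRECONDITION & SPEC =====
-- For c < 1 and nonempty s, A's d[i]==c cap test can never fire (counts start at 1), so A returns len(s);
-- B returns 0, the intended result since a nonpositive capacity c admits no occurrences.
def D_query (c : Int) (s : String) : Prop := c < 1 ∧ s ≠ ""
instance (c : Int) (s : String) : Decidable (D_query c s) := by unfold D_query; infer_instance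

def Spec_query (c : Int) (s : String) (out : Int) : Prop := ¬ D_query c s → out = query_alt c s
instance (c : Int) (s : String) (out : Int) : Decidable (Spec_query c s out) := by unfold Spec_query; infer_instance

def pvDiffWitness_query : Int × String := (0, "a")
def pvDiffWitnessOut_query : Int × Int := (1, 0)

-- ===== CLAIM (what is proved, stated in full; the proofs are below) =====
def Claim_unchanged_query : Prop := ∀ (c : Int) (s : String), Dom_query c s → Spec_query c s (query c s)
def Claim_changed_query : Prop := Dom_query (pvDiffWitness_query.1) (pvDiffWitness_query.2) ∧ D_query (pvDiffWitness_query.1) (pvDiffWitness_query.2) ∧ query (pvDiffWitness_query.1) (pvDiffWitness_query.2) = pvDiffWitnessOut_query.1 ∧ query_alt (pvDiffWitness_query.1) (pvDiffWitness_query.2) = pvDiffWitnessOut_query.2 ∧ pvDiffWitnessOut_query.1 ≠ pvDiffWitnessOut_query.2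
def Claim_exact_query : Prop := ∀ (c : Int) (s : String), Dom_query c s → D_query c s → query c s ≠ query_alt c s

-- ===== LEMMAS AND PROOFS =====

-- A's per-key capped count (what the dict entry of a key converges to)
def capv (c n : Int) : Int := if c < 1 then n else min n c
theorem capv_one (c : Int) : capv c 1 = 1 := by
  unfold capv; split_ifs with h; rfl; omega

theorem query_loop_items (c : Int) (l : List Char) :
    l.foldl (queryStep c) PySem.Dict.empty
      = PySem.Dict.mk ((PySem.Set.ofList l).map (fun k => (k, capv c (l.count k : Int)))) := by
  induction l using List.reverseRecOn with
  | nil => rfl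
  | append_singleton l x ih =>
    rw [List.foldl_append, List.foldl_cons, List.foldl_nil, ih]
    set L := (PySem.Set.ofList l).map (fun k => (k, capv c (l.count k : Int))) with hL
    have hkeys : (PySem.Dict.mk L).keys = PySem.Set.ofList l := by
      simp [PySem.Dict.keys, hL, List.map_map, Function.comp_def]
    have hnd : (PySem.Dict.mk L).keys.Nodup := by rw [hkeys]; exact PySem.Set.nodup_ofList l
    have hof : PySem.Set.ofList (l ++ [x]) = PySem.Set.add (PySem.Set.ofList l) x := by
      rw [PySem.Set.ofList_append]; rfl
    by_cases hx : x ∈ l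
    · -- x already present
      have hmemset : x ∈ PySem.Set.ofList l := (PySem.Set.mem_ofList l x).mpr hx
      have hadd : PySem.Set.add (PySem.Set.ofList l) x = PySem.Set.ofList l := by
        simp [PySem.Set.add, hmemset]
      have hcontains : (PySem.Dict.mk L).contains x = true := by
        rw [PySem.Dict.contains_iff_mem_keys, hkeys]; exact hmemset
      have hmemitems : (x, capv c (l.count x : Int)) ∈ (PySem.Dict.mk L).items := by
        simp [hL]; exact hx
      have hgetD : (PySem.Dict.mk L).getD x 0 = capv c (l.count x : Int) :=
        PySem.Dict.getD_of_mem_items _ hmemitems hnd 0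
      have hcount1 : 1 ≤ l.count x := List.one_le_count_iff.mpr hx
      unfold queryStep
      rw [hcontains, hgetD]
      simp only [not_true_eq_false, if_false]
      by_cases hv : capv c (l.count x : Int) = c
      · -- sentinel reached: dict unchanged; capped value stays c
        rw [if_neg (by simpa using hv)]
        have hc1 : 1 ≤ c := by
          unfold capv at hv; split_ifs at hv with h
          · omega
          · omega
        have : ∀ k ∈ PySem.Set.ofList l,
            (k, capv c ((l ++ [x]).count k : Int)) = (k, capv c (l.count k : Int)) := by
          intro k hk
          by_cases hkx : k = x
          · subst hkx
            have : (l ++ [k]).count k = l.count k + 1 := by simp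
            rw [this]
            congr 1
            unfold capv at hv ⊢
            rw [if_neg (by omega)] at hv ⊢
            push_cast
            omega
          · have hxk : ¬ x = k := fun h => hkx h.symm
            simp [List.count_append, hxk]
        rw [hof, hadd]
        congr 1
        exact (List.map_congr_left this).symm
      · -- increment
        rw [if_pos (by simpa using hv)]
        have hitems := PySem.Dict.items_insert_of_contains (d := PySem.Dict.mk L)
          (k := x) (v := capv c (l.count x : Int) + 1) hcontains
        apply PySem.Dict.ext
        rw [hitems]
        simp only [hL, hof, hadd, List.map_map]
        apply List.map_congr_left
        intro k hk
        by_cases hkx : k = x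
        · subst hkx
          simp only [Function.comp, beq_self_eq_true, if_pos]
          have : (l ++ [k]).count k = l.count k + 1 := by simp
          rw [this]
          congr 1
          unfold capv at hv ⊢
          split_ifs with h
          · push_cast; ring
          · push_cast; omega
        · have : (k == x) = false := by simp [hkx]
          have hxk : ¬ x = k := fun h => hkx h.symm
          simp [Function.comp, this, List.count_append, hxk]
    · -- fresh key
      have hmemset : x ∉ PySem.Set.ofList l := fun h => hx ((PySem.Set.mem_ofList l x).mp h)
      have hcontains : (PySem.Dict.mk L).contains x = false := by
        rw [Bool.eq_false_iff]
        intro h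
        exact hmemset (by rw [← hkeys]; exact (PySem.Dict.contains_iff_mem_keys _ _).mp h)
      have hadd : PySem.Set.add (PySem.Set.ofList l) x = PySem.Set.ofList l ++ [x] := by
        simp [PySem.Set.add, hmemset]
      unfold queryStep
      rw [hcontains]
      simp only [Bool.false_eq_true, not_false_eq_true, if_true]
      apply PySem.Dict.ext
      rw [PySem.Dict.items_insert_of_not_contains _ _ hcontains]
      simp only [hL, hof, hadd, List.map_append]
      congr 1
      · apply List.map_congr_left
        intro k hk
        have hxk : ¬ x = k := fun h => hmemset (h ▸ hk)
        simp [List.count_append, hxk]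
      · simp [List.count_append, capv_one, List.count_eq_zero_of_not_mem hx]

-- sum of a function over the distinct elements, as a Finset sum
theorem sum_map_ofList (l : List Char) (f : Char → Int) :
    ((PySem.Set.ofList l).map f).sum = ∑ k ∈ l.toFinset, f k := by
  have hnd := PySem.Set.nodup_ofList l
  have hto : (PySem.Set.ofList l).toFinset = l.toFinset := by
    ext k
    simp [PySem.Set.mem_ofList]
  rw [← List.sum_toFinset f hnd, hto]

-- A's value is the sum of capv over the distinct characters
theorem queryA_char (c : Int) (s : String) :
    query c s = ∑ k ∈ s.toList.toFinset, capv c (s.toList.count k : Int) := by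
  unfold query
  rw [query_loop_items]
  have : (PySem.Dict.mk ((PySem.Set.ofList s.toList).map
      (fun k => (k, capv c (s.toList.count k : Int))))).values
      = (PySem.Set.ofList s.toList).map (fun k => capv c (s.toList.count k : Int)) := by
    simp [PySem.Dict.values, List.map_map, Function.comp_def]
  rw [this, sum_map_ofList]

-- the invariant of Source B's single scan over a sorted list
theorem bfold_sorted (c : Int) :
    ∀ (t : List Char), t.Pairwise (· ≤ ·) →
    ∀ (tot r : Int) (p : Option Char), 0 ≤ r →
    (∀ a, p = some a → ∀ x ∈ t, a ≤ x) →
    (t.foldl (bStep c) (tot, r, p)).1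
      = tot + ∑ k ∈ t.toFinset,
          (if p = some k then min (r + (t.count k : Int)) (max c 0) - min r (max c 0)
           else min (t.count k : Int) (max c 0)) := by
  intro t
  induction t with
  | nil => intro _ tot r p _ _; simp
  | cons x t0 ih =>
    intro hpw tot r p hr hp
    obtain ⟨hx, hpw0⟩ := List.pairwise_cons.mp hpw
    rw [List.foldl_cons]
    by_cases hpx : p = some x
    · -- the head continues the current run
      have hstep : bStep c (tot, r, p) x
          = (tot + (if r + 1 ≤ c then 1 else 0), r + 1, some x) := by
        simp [bStep, hpx]
      rw [hstep, ih hpw0 _ _ _ (by omega) (by intro a ha y hy; cases ha; exact hx y hy)]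
      have hsum : ∑ k ∈ (x :: t0).toFinset,
            (if p = some k then min (r + ((x :: t0).count k : Int)) (max c 0) - min r (max c 0)
             else min (((x :: t0).count k : Int)) (max c 0))
          = (if r + 1 ≤ c then 1 else 0)
            + ∑ k ∈ t0.toFinset,
              (if some x = some k then min ((r + 1) + (t0.count k : Int)) (max c 0) - min (r + 1) (max c 0)
               else min ((t0.count k : Int)) (max c 0)) := by
        by_cases hmem : x ∈ t0
        · have hins : (x :: t0).toFinset = t0.toFinset := by
            simp [List.toFinset_cons, hmem]
          have hxin : x ∈ t0.toFinset := List.mem_toFinset.mpr hmem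
          rw [hins, ← Finset.add_sum_erase _ _ hxin, ← Finset.add_sum_erase _ _ hxin]
          have herase : ∀ k ∈ t0.toFinset.erase x,
              (if p = some k then min (r + ((x :: t0).count k : Int)) (max c 0) - min r (max c 0)
               else min (((x :: t0).count k : Int)) (max c 0))
              = (if some x = some k then min ((r + 1) + (t0.count k : Int)) (max c 0) - min (r + 1) (max c 0)
                 else min ((t0.count k : Int)) (max c 0)) := by
            intro k hk
            have hkx : k ≠ x := (Finset.mem_erase.mp hk).1
            have hxk : ¬ (x = k) := fun h => hkx h.symm
            have hcnt : (x :: t0).count k = t0.count k := by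
              simp [hxk]
            rw [hcnt, if_neg (by rw [hpx]; simp [hxk]), if_neg (by simp [hxk])]
          rw [Finset.sum_congr rfl herase]
          have hcx : (x :: t0).count x = t0.count x + 1 := by
            simp
          rw [if_pos hpx, if_pos rfl, hcx]
          have hnn : (0:Int) ≤ (t0.count x : Int) := by positivity
          push_cast
          split_ifs with h <;> omega
        · have hxnotin : x ∉ t0.toFinset := fun h => hmem (List.mem_toFinset.mp h)
          rw [List.toFinset_cons, Finset.sum_insert hxnotin]
          have hc0 : t0.count x = 0 := List.count_eq_zero_of_not_mem hmem
          have hcx : (x :: t0).count x = 1 := by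
            simp [hc0]
          have hrest : ∀ k ∈ t0.toFinset,
              (if p = some k then min (r + ((x :: t0).count k : Int)) (max c 0) - min r (max c 0)
               else min (((x :: t0).count k : Int)) (max c 0))
              = (if some x = some k then min ((r + 1) + (t0.count k : Int)) (max c 0) - min (r + 1) (max c 0)
                 else min ((t0.count k : Int)) (max c 0)) := by
            intro k hk
            have hkx : k ≠ x := fun h => hmem (h ▸ List.mem_toFinset.mp hk)
            have hxk : ¬ (x = k) := fun h => hkx h.symm
            have hcnt : (x :: t0).count k = t0.count k := by
              simp [hxk]
            rw [hcnt, if_neg (by rw [hpx]; simp [hxk]), if_neg (by simp [hxk])]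
          rw [Finset.sum_congr rfl hrest, if_pos hpx, hcx]
          push_cast
          split_ifs with h <;> omega
      rw [hsum]
      ring
    · -- the head starts a fresh run
      have hbeq : (p == some x) = false := by
        cases p <;> simp_all
      have hstep : bStep c (tot, r, p) x
          = (tot + (if (1:Int) ≤ c then 1 else 0), 1, some x) := by
        simp [bStep, hbeq]
      rw [hstep, ih hpw0 _ _ _ (by omega) (by intro a ha y hy; cases ha; exact hx y hy)]
      have hnok : ∀ k ∈ (x :: t0).toFinset, p ≠ some k := by
        intro k hk hpk
        rcases List.mem_cons.mp (List.mem_toFinset.mp hk) with h | h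
        · exact hpx (h ▸ hpk)
        · exact hpx (by rw [hpk, le_antisymm (hp k hpk x (by simp)) (hx k h)])
      have hsum : ∑ k ∈ (x :: t0).toFinset,
            (if p = some k then min (r + ((x :: t0).count k : Int)) (max c 0) - min r (max c 0)
             else min (((x :: t0).count k : Int)) (max c 0))
          = (if (1:Int) ≤ c then 1 else 0)
            + ∑ k ∈ t0.toFinset,
              (if some x = some k then min (1 + (t0.count k : Int)) (max c 0) - min 1 (max c 0)
               else min ((t0.count k : Int)) (max c 0)) := by
        rw [Finset.sum_congr rfl (fun k hk => if_neg (hnok k hk))]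
        by_cases hmem : x ∈ t0
        · have hins : (x :: t0).toFinset = t0.toFinset := by
            simp [List.toFinset_cons, hmem]
          have hxin : x ∈ t0.toFinset := List.mem_toFinset.mpr hmem
          rw [hins, ← Finset.add_sum_erase _ _ hxin, ← Finset.add_sum_erase _ _ hxin]
          have herase : ∀ k ∈ t0.toFinset.erase x,
              min (((x :: t0).count k : Int)) (max c 0)
              = (if some x = some k then min (1 + (t0.count k : Int)) (max c 0) - min 1 (max c 0)
                 else min ((t0.count k : Int)) (max c 0)) := by
            intro k hk
            have hkx : k ≠ x := (Finset.mem_erase.mp hk).1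
            have hxk : ¬ (x = k) := fun h => hkx h.symm
            have hcnt : (x :: t0).count k = t0.count k := by
              simp [hxk]
            rw [hcnt, if_neg (by simp [hxk])]
          rw [Finset.sum_congr rfl herase]
          have hcx : (x :: t0).count x = t0.count x + 1 := by
            simp
          rw [if_pos rfl, hcx]
          have hnn : (0:Int) ≤ (t0.count x : Int) := by positivity
          push_cast
          split_ifs with h <;> omega
        · have hxnotin : x ∉ t0.toFinset := fun h => hmem (List.mem_toFinset.mp h)
          rw [List.toFinset_cons, Finset.sum_insert hxnotin]
          have hc0 : t0.count x = 0 := List.count_eq_zero_of_not_mem hmem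
          have hcx : (x :: t0).count x = 1 := by
            simp [hc0]
          have hrest : ∀ k ∈ t0.toFinset,
              min (((x :: t0).count k : Int)) (max c 0)
              = (if some x = some k then min (1 + (t0.count k : Int)) (max c 0) - min 1 (max c 0)
                 else min ((t0.count k : Int)) (max c 0)) := by
            intro k hk
            have hkx : k ≠ x := fun h => hmem (h ▸ List.mem_toFinset.mp hk)
            have hxk : ¬ (x = k) := fun h => hkx h.symm
            have hcnt : (x :: t0).count k = t0.count k := by
              simp [hxk]
            rw [hcnt, if_neg (by simp [hxk])]
          rw [Finset.sum_congr rfl hrest, hcx]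
          push_cast
          split_ifs with h <;> omega
      rw [hsum]
      ring

-- B's value is the sum of min(count, max(c,0)) over the distinct characters
theorem queryB_char (c : Int) (s : String) :
    query_alt c s = ∑ k ∈ s.toList.toFinset, min (s.toList.count k : Int) (max c 0) := by
  unfold query_alt
  have hpw : (PySem.List.sorted s.toList (fun x => x) false).Pairwise (· ≤ ·) :=
    PySem.List.sorted_pairwise s.toList (fun x => x)
  rw [bfold_sorted c _ hpw 0 0 none le_rfl (by intro a ha; cases ha)]
  have hperm : (PySem.List.sorted s.toList (fun x => x) false).Perm s.toList :=
    PySem.List.sorted_perm s.toList (fun x => x) false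
  have hto : (PySem.List.sorted s.toList (fun x => x) false).toFinset = s.toList.toFinset := by
    ext k
    simp [List.mem_toFinset, hperm.mem_iff]
  rw [zero_add, hto]
  apply Finset.sum_congr rfl
  intro k _
  rw [if_neg (by simp), hperm.count_eq]

-- ===== VERDICT (by name: the statement is the Claim_ definition above) =====
theorem query_spec : Claim_unchanged_query := by
  intro c s _ hnd
  rw [queryA_char, queryB_char]
  by_cases hc : 1 ≤ c
  · apply Finset.sum_congr rfl
    intro k _
    unfold capv
    rw [if_neg (by omega)]
    have : max c 0 = c := by omega
    rw [this]
  · have hs : s = "" := by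
      by_contra h
      exact hnd ⟨by omega, h⟩
    subst hs
    simp

theorem query_changed : Claim_changed_query := by unfold Claim_changed_query; decide

theorem query_tight : Claim_exact_query := by
  intro c s _ hd
  obtain ⟨hc, hs⟩ := hd
  rw [queryA_char, queryB_char]
  have hmax : max c 0 = 0 := by omega
  have hB : ∑ k ∈ s.toList.toFinset, min (s.toList.count k : Int) (max c 0) = 0 := by
    rw [hmax]
    apply Finset.sum_eq_zero
    intro k _
    have : (0:Int) ≤ (s.toList.count k : Int) := by positivity
    omega
  have hA : ∑ k ∈ s.toList.toFinset, capv c (s.toList.count k : Int)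
      = (s.toList.length : Int) := by
    have : ∀ k ∈ s.toList.toFinset, capv c (s.toList.count k : Int) = (s.toList.count k : Int) := by
      intro k _
      unfold capv
      rw [if_pos hc]
    rw [Finset.sum_congr rfl this, ← Nat.cast_sum, List.sum_toFinset_count_eq_length]
  rw [hA, hB]
  have hne : s.toList ≠ [] := by
    intro h
    exact hs (by cases s; simp_all)
  have : 0 < s.toList.length := List.length_pos_iff.mpr hne
  omega
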